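-- pv_equiv track=rewrite | github.com/jestxfot/zapretgui | ui/pages/my_categories_page.py | _is_valid_ports_spec
-- ===== SOURCE A (Python) =====
-- def _is_valid_ports_spec(value: str) -> bool:
--     """
--     Validates a winws ports specification:
--     - "*" OR
--     - comma-separated list of ports and/or ranges: "80,443" / "80-443" / "80,443-5000"
--     """
--     v = str(value or "").strip()
--     if not v:
--         return False
--     if v == "*":
--         return True
--
--     for part in v.split(","):
--         p = part.strip()
--         if not p:
--             return False
--         if "-" in p:
--             a, b = p.split("-", 1)
--             if not a.isdigit() or not b.isdigit():
--                 return False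
--             start = int(a)
--             end = int(b)
--             if start < 1 or end < 1 or start > 65535 or end > 65535:
--                 return False
--             if start > end:
--                 return False
--         else:
--             if not p.isdigit():
--                 return False
--             port = int(p)
--             if port < 1 or port > 65535:
--                 return False
--
--     return True
-- ===== SOURCE B (Python) =====
-- def _is_valid_ports_spec(value: str) -> bool:
--     """
--     Validates a winws ports specification:
--     - "*" OR
--     - comma-separated list of ports and/or ranges: "80,443" / "80-443" / "80,443-5000"
--     """
--     v = str(value or "").strip()
--     if not v:
--         return False
--     if v == "*":
--         return True
--     # Single character-level scan (finite-state machine) instead of split/strip/int parsing.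
--     # States: 0 = start of a part (skipping leading spaces), 1 = inside first number,
--     # 2 = expecting first digit of second number, 3 = inside second number,
--     # 4 = trailing spaces after a single number, 5 = trailing spaces after a range.
--     state = 0
--     lo = hi = 0
--     for c in v + ",":  # sentinel comma closes the last part
--         if state == 0:
--             if c.isspace():
--                 continue
--             if c.isdigit():
--                 lo = ord(c) - 48
--                 state = 1
--             else:
--                 return False
--         elif state == 1:
--             if c.isdigit():
--                 lo = lo * 10 + (ord(c) - 48)
--             elif c == "-":
--                 state = 2
--             elif c == ",":
--                 if lo < 1 or lo > 65535:
--                     return False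
--                 lo = hi = 0
--                 state = 0
--             elif c.isspace():
--                 state = 4
--             else:
--                 return False
--         elif state == 2:
--             if c.isdigit():
--                 hi = ord(c) - 48
--                 state = 3
--             else:
--                 return False
--         elif state == 3:
--             if c.isdigit():
--                 hi = hi * 10 + (ord(c) - 48)
--             elif c == ",":
--                 if lo < 1 or lo > 65535 or hi < 1 or hi > 65535 or lo > hi:
--                     return False
--                 lo = hi = 0
--                 state = 0
--             elif c.isspace():
--                 state = 5
--             else:
--                 return False
--         elif state == 4:
--             if c.isspace():
--                 continue
--             if c == ",":
--                 if lo < 1 or lo > 65535: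
--                     return False
--                 lo = hi = 0
--                 state = 0
--             else:
--                 return False
--         else:  # state == 5
--             if c.isspace():
--                 continue
--             if c == ",":
--                 if lo < 1 or lo > 65535 or hi < 1 or hi > 65535 or lo > hi:
--                     return False
--                 lo = hi = 0
--                 state = 0
--             else:
--                 return False
--     return True
-- ===== Notes on version B (the rewrite author's own statement) =====
-- stated objective: alternative
-- what changed: B replaces A's split(",")/strip/split("-")/isdigit/int parsing pipeline with a single character-level finite-state machine that scans the string once (with a sentinel comma), accumulating each port number digit by digit and checking bounds and range order at each part boundary; no splitting, stripping or int() calls.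
import Mathlib
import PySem

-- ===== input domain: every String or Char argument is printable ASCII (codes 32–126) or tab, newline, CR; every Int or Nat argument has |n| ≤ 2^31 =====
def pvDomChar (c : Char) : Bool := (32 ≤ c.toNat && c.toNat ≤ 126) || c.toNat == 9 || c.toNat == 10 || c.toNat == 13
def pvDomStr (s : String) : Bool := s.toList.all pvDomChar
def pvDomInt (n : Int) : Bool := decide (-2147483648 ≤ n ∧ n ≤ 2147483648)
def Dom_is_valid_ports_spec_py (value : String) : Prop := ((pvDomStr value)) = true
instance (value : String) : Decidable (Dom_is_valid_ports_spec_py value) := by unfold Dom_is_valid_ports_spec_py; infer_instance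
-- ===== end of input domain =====

-- B replaces A's split/strip/isdigit/int parsing pipeline with a single character-level
-- finite-state scan of the string (objective: alternative; same cost).

-- ===== PORT A =====
-- int(s) ported by hand as the decimal-digit fold; exact here because every call site is
-- guarded by isdigit(), which admits exactly the characters '0'..'9' on the ASCII domain.
def pvIntOf (ds : List Char) : Int := ds.foldl (fun a c => a * 10 + ((c.toNat : Int) - 48)) 0

-- the body of A's `for part in v.split(",")` loop on p = part.strip()
def pvACheck (p : List Char) : Bool :=
  if p.isEmpty then false
  else if PySem.Chars.isIn ['-'] p then
    match PySem.Chars.splitOnMax p ['-'] 1 with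
    | [a, b] =>
      if !(PySem.Chars.strIsdigit a) || !(PySem.Chars.strIsdigit b) then false
      else
        let start := pvIntOf a
        let endv := pvIntOf b
        if start < 1 || endv < 1 || 65535 < start || 65535 < endv then false
        else if endv < start then false
        else true
    | _ => false  -- unreachable: split(sep, 1) with sep present yields exactly two pieces
  else
    if !(PySem.Chars.strIsdigit p) then false
    else
      let port := pvIntOf p
      if port < 1 || 65535 < port then false else true

def pvALoop : List (List Char) → Bool
  | [] => true
  | part :: rest => if pvACheck (PySem.Chars.strip part) then pvALoop rest else false

def is_valid_ports_spec_py (value : String) : Bool :=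
  let v := PySem.Chars.strip value.toList
  if v.isEmpty then false
  else if v = ['*'] then true
  else pvALoop (PySem.Chars.splitOn v [','])

-- ===== PORT B =====
-- the finite-state machine of Source B: states 0 = start of part, 1 = in first number,
-- 2 = expecting first digit of second number, 3 = in second number,
-- 4 = trailing spaces after a single number, 5 = trailing spaces after a range
def pvScan (st lo hi : Int) : List Char → Bool
  | [] => true
  | c :: cs =>
    if st = 0 then
      if PySem.Chars.isspace c then pvScan 0 lo hi cs
      else if PySem.Chars.isdigit c then pvScan 1 ((c.toNat : Int) - 48) hi cs
      else false
    else if st = 1 then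
      if PySem.Chars.isdigit c then pvScan 1 (lo * 10 + ((c.toNat : Int) - 48)) hi cs
      else if c = '-' then pvScan 2 lo hi cs
      else if c = ',' then
        if lo < 1 || 65535 < lo then false else pvScan 0 0 0 cs
      else if PySem.Chars.isspace c then pvScan 4 lo hi cs
      else false
    else if st = 2 then
      if PySem.Chars.isdigit c then pvScan 3 lo ((c.toNat : Int) - 48) cs
      else false
    else if st = 3 then
      if PySem.Chars.isdigit c then pvScan 3 lo (hi * 10 + ((c.toNat : Int) - 48)) cs
      else if c = ',' then
        if lo < 1 || 65535 < lo || hi < 1 || 65535 < hi || hi < lo then false else pvScan 0 0 0 cs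
      else if PySem.Chars.isspace c then pvScan 5 lo hi cs
      else false
    else if st = 4 then
      if PySem.Chars.isspace c then pvScan 4 lo hi cs
      else if c = ',' then
        if lo < 1 || 65535 < lo then false else pvScan 0 0 0 cs
      else false
    else
      if PySem.Chars.isspace c then pvScan 5 lo hi cs
      else if c = ',' then
        if lo < 1 || 65535 < lo || hi < 1 || 65535 < hi || hi < lo then false else pvScan 0 0 0 cs
      else false

def is_valid_ports_spec_py_alt (value : String) : Bool :=
  let v := PySem.Chars.strip value.toList
  if v.isEmpty then false
  else if v = ['*'] then true
  else pvScan 0 0 0 (v ++ [','])  -- sentinel comma closes the last part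

-- ===== PRECONDITION & SPEC =====
def Spec_is_valid_ports_spec_py (value : String) (out : Bool) : Prop := out = is_valid_ports_spec_py_alt value
instance (value : String) (out : Bool) : Decidable (Spec_is_valid_ports_spec_py value out) := by unfold Spec_is_valid_ports_spec_py; infer_instance

-- ===== CLAIM (what is proved, stated in full; the proofs are below) =====
def Claim_equal_is_valid_ports_spec_py : Prop := ∀ (value : String), Dom_is_valid_ports_spec_py value → Spec_is_valid_ports_spec_py value (is_valid_ports_spec_py value)

-- ===== LEMMAS AND PROOFS =====

-- ---- generic single-character split characterisation ----
-- head of `p.split(sep)` = run before the first sep, tail = split of the rest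
def tw (sep : Char) (p : List Char) : List Char := p.takeWhile (fun c => !decide (c = sep))
def rst (sep : Char) (p : List Char) : List Char := p.drop ((tw sep p).length + 1)

lemma go_step (sep : Char) (fuel : Nat) (c : Char) (rest cur : List Char) (acc : List (List Char)) :
    PySem.Chars.splitOn.go [sep] (fuel+1) (c :: rest) cur acc =
      if sep = c then PySem.Chars.splitOn.go [sep] fuel rest [] (cur.reverse :: acc)
      else PySem.Chars.splitOn.go [sep] fuel rest (c :: cur) acc := by
  simp [PySem.Chars.splitOn.go, List.isPrefixOf]

lemma go_nil (sep : Char) (fuel : Nat) (cur : List Char) (acc : List (List Char)) :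
    PySem.Chars.splitOn.go [sep] fuel [] cur acc = (cur.reverse :: acc).reverse := by
  cases fuel <;> simp [PySem.Chars.splitOn.go]

lemma go_split (sep : Char) (l : List Char) : ∀ (fuel : Nat) (cur : List Char) (acc : List (List Char)),
    l.length ≤ fuel →
    PySem.Chars.splitOn.go [sep] fuel l cur acc =
      acc.reverse ++ (if sep ∈ l then (cur.reverse ++ tw sep l) :: PySem.Chars.splitOn (rst sep l) [sep] else [cur.reverse ++ l]) := by
  induction l with
  | nil => intro fuel cur acc _; simp [go_nil]
  | cons c rest ih =>
    intro fuel cur acc hf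
    have hsp : PySem.Chars.splitOn rest [sep] =
        (if sep ∈ rest then (tw sep rest) :: PySem.Chars.splitOn (rst sep rest) [sep] else [rest]) := by
      rw [PySem.Chars.splitOn.eq_1, ih (rest.length + 1) [] [] (by omega)]
      simp
    cases fuel with
    | zero => simp at hf
    | succ f =>
      rw [go_step]
      by_cases hc : sep = c
      · subst hc
        rw [if_pos rfl, ih f [] (cur.reverse :: acc) (by simpa using hf)]
        have htw : tw sep (sep :: rest) = [] := by simp [tw]
        have hrst : rst sep (sep :: rest) = rest := by simp [rst, htw]
        rw [if_pos (List.mem_cons_self), htw, hrst, hsp]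
        by_cases hm : sep ∈ rest
        · rw [if_pos hm, if_pos hm]; simp
        · rw [if_neg hm, if_neg hm]; simp
      · have hcc : ¬ (c = sep) := fun h => hc h.symm
        rw [if_neg hc, ih f (c :: cur) acc (by simpa using hf)]
        have htw : tw sep (c :: rest) = c :: tw sep rest := by simp [tw, hcc]
        have hrst : rst sep (c :: rest) = rst sep rest := by simp [rst, htw]
        have hm : (sep ∈ c :: rest) ↔ sep ∈ rest := by
          simp [List.mem_cons]; exact fun h => absurd h.symm hcc
        by_cases h2 : sep ∈ rest
        · rw [if_pos h2, if_pos (hm.mpr h2), htw, hrst]; simp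
        · rw [if_neg h2, if_neg (fun hx => h2 (hm.mp hx))]; simp

lemma splitOn_char (sep : Char) (p : List Char) :
    PySem.Chars.splitOn p [sep] =
      (if sep ∈ p then (tw sep p) :: PySem.Chars.splitOn (rst sep p) [sep] else [p]) := by
  rw [PySem.Chars.splitOn.eq_1, go_split sep p (p.length + 1) [] [] (by omega)]
  simp

-- `p.split(sep, 1)` with sep present: exactly the piece before the first sep and the remainder
lemma goMax_zero (sep : Char) (fuel : Nat) (l cur : List Char) (acc : List (List Char)) :
    PySem.Chars.splitOnMax.go [sep] fuel 0 l cur acc = ((cur.reverse ++ l) :: acc).reverse := by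
  cases fuel <;> cases l <;> simp [PySem.Chars.splitOnMax.go]

lemma goMax_step (sep : Char) (fuel : Nat) (c : Char) (rest cur : List Char) (acc : List (List Char)) :
    PySem.Chars.splitOnMax.go [sep] (fuel+1) 1 (c :: rest) cur acc =
      if sep = c then PySem.Chars.splitOnMax.go [sep] fuel 0 rest [] (cur.reverse :: acc)
      else PySem.Chars.splitOnMax.go [sep] fuel 1 rest (c :: cur) acc := by
  simp [PySem.Chars.splitOnMax.go, List.isPrefixOf]

lemma goMax_split (sep : Char) (l : List Char) : ∀ (fuel : Nat) (cur : List Char) (acc : List (List Char)),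
    l.length ≤ fuel →
    PySem.Chars.splitOnMax.go [sep] fuel 1 l cur acc =
      acc.reverse ++ (if sep ∈ l then [cur.reverse ++ tw sep l, rst sep l] else [cur.reverse ++ l]) := by
  induction l with
  | nil => intro fuel cur acc _; cases fuel <;> simp [PySem.Chars.splitOnMax.go]
  | cons c rest ih =>
    intro fuel cur acc hf
    cases fuel with
    | zero => simp at hf
    | succ f =>
      rw [goMax_step]
      by_cases hc : sep = c
      · subst hc
        rw [if_pos rfl, goMax_zero]
        have htw : tw sep (sep :: rest) = [] := by simp [tw]
        have hrst : rst sep (sep :: rest) = rest := by simp [rst, htw]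
        rw [if_pos (List.mem_cons_self), htw, hrst]
        simp
      · have hcc : ¬ (c = sep) := fun h => hc h.symm
        rw [if_neg hc, ih f (c :: cur) acc (by simpa using hf)]
        have htw : tw sep (c :: rest) = c :: tw sep rest := by simp [tw, hcc]
        have hrst : rst sep (c :: rest) = rst sep rest := by simp [rst, htw]
        have hm : (sep ∈ c :: rest) ↔ sep ∈ rest := by
          simp [List.mem_cons]; exact fun h => absurd h.symm hcc
        by_cases h2 : sep ∈ rest
        · rw [if_pos h2, if_pos (hm.mpr h2), htw, hrst]; simp
        · rw [if_neg h2, if_neg (fun hx => h2 (hm.mp hx))]; simp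

lemma splitOnMax_one (sep : Char) {p : List Char} (h : sep ∈ p) :
    PySem.Chars.splitOnMax p [sep] 1 = [tw sep p, rst sep p] := by
  rw [PySem.Chars.splitOnMax.eq_1]
  norm_num
  rw [goMax_split sep p (p.length + 1) [] [] (by omega)]
  simp [h]

lemma isIn_single (sep : Char) (p : List Char) : PySem.Chars.isIn [sep] p = true ↔ sep ∈ p := by
  rw [PySem.Chars.isIn_iff_infix, List.singleton_infix_iff]

lemma not_mem_tw (sep : Char) (p : List Char) : sep ∉ tw sep p := by
  intro h
  have := List.mem_takeWhile_imp h
  simp at this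

lemma decomp (sep : Char) {p : List Char} (h : sep ∈ p) :
    p = tw sep p ++ sep :: rst sep p := by
  induction p with
  | nil => simp at h
  | cons c cs ih =>
    by_cases hc : c = sep
    · subst hc; simp [tw, rst]
    · have hm : sep ∈ cs := by
        rcases List.mem_cons.mp h with h1 | h1
        · exact absurd h1.symm hc
        · exact h1
      have htw : tw sep (c :: cs) = c :: tw sep cs := by simp [tw, hc]
      have hrst : rst sep (c :: cs) = rst sep cs := by simp [rst, htw]
      rw [htw, hrst]
      simpa using ih hm

lemma length_rst (sep : Char) {p : List Char} (h : sep ∈ p) : (rst sep p).length < p.length := by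
  conv_rhs => rw [decomp sep h]
  simp
  omega

-- ---- the automaton on one comma-free part ----
-- per-part closing verdicts
def pvOk1 (lo : Int) : Bool := !(lo < 1 || 65535 < lo)
def pvOkR (lo hi : Int) : Bool := !(lo < 1 || 65535 < lo || hi < 1 || 65535 < hi || hi < lo)

def pvClose (st lo hi : Int) : Bool :=
  if st = 0 then false
  else if st = 1 then pvOk1 lo
  else if st = 2 then false
  else if st = 3 then pvOkR lo hi
  else if st = 4 then pvOk1 lo
  else pvOkR lo hi

-- pvScan restricted to a single comma-free part: like pvScan without the ',' branches,
-- closing with pvClose at the end of the part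
def pvAccept (st lo hi : Int) : List Char → Bool
  | [] => pvClose st lo hi
  | c :: cs =>
    if st = 0 then
      if PySem.Chars.isspace c then pvAccept 0 lo hi cs
      else if PySem.Chars.isdigit c then pvAccept 1 ((c.toNat : Int) - 48) hi cs
      else false
    else if st = 1 then
      if PySem.Chars.isdigit c then pvAccept 1 (lo * 10 + ((c.toNat : Int) - 48)) hi cs
      else if c = '-' then pvAccept 2 lo hi cs
      else if PySem.Chars.isspace c then pvAccept 4 lo hi cs
      else false
    else if st = 2 then
      if PySem.Chars.isdigit c then pvAccept 3 lo ((c.toNat : Int) - 48) cs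
      else false
    else if st = 3 then
      if PySem.Chars.isdigit c then pvAccept 3 lo (hi * 10 + ((c.toNat : Int) - 48)) cs
      else if PySem.Chars.isspace c then pvAccept 5 lo hi cs
      else false
    else if st = 4 then
      if PySem.Chars.isspace c then pvAccept 4 lo hi cs
      else false
    else
      if PySem.Chars.isspace c then pvAccept 5 lo hi cs
      else false

-- character-class facts
lemma space_facts {c : Char} (h : PySem.Chars.isspace c = true) :
    PySem.Chars.isdigit c = false ∧ c ≠ '-' ∧ c ≠ ',' := by
  have hn : c.toNat = 32 ∨ (9 ≤ c.toNat ∧ c.toNat ≤ 13) ∨ (28 ≤ c.toNat ∧ c.toNat ≤ 31) ∨ c.toNat = 133 ∨ c.toNat = 160 ∨ c.toNat = 5760 ∨ (8192 ≤ c.toNat ∧ c.toNat ≤ 8202) ∨ c.toNat = 8232 ∨ c.toNat = 8233 ∨ c.toNat = 8239 ∨ c.toNat = 8287 ∨ c.toNat = 12288 := by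
    have := h; simp [PySem.Chars.isspace] at this; tauto
  refine ⟨?_, ?_, ?_⟩
  · rcases hb : PySem.Chars.isdigit c with _|_
    · rfl
    · exfalso
      simp [PySem.Chars.isdigit, Char.le_def] at hb
      have e1 : ('0' : Char).val.toNat ≤ c.val.toNat := UInt32.le_iff_toNat_le.mp hb.1
      have e2 : c.val.toNat ≤ ('9' : Char).val.toNat := UInt32.le_iff_toNat_le.mp hb.2
      have e3 : c.toNat = c.val.toNat := rfl
      have e4 : ('0' : Char).val.toNat = 48 := by decide
      have e5 : ('9' : Char).val.toNat = 57 := by decide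
      omega
  · intro he; subst he; simp [Char.toNat] at hn
  · intro he; subst he; simp [Char.toNat] at hn

lemma digit_facts {c : Char} (h : PySem.Chars.isdigit c = true) :
    PySem.Chars.isspace c = false ∧ c ≠ '-' ∧ c ≠ ',' := by
  simp [PySem.Chars.isdigit, Char.le_def] at h
  have e1 : ('0' : Char).val.toNat ≤ c.val.toNat := UInt32.le_iff_toNat_le.mp h.1
  have e2 : c.val.toNat ≤ ('9' : Char).val.toNat := UInt32.le_iff_toNat_le.mp h.2
  have e3 : c.toNat = c.val.toNat := rfl
  have e4 : ('0' : Char).val.toNat = 48 := by decide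
  have e5 : ('9' : Char).val.toNat = 57 := by decide
  refine ⟨?_, ?_, ?_⟩
  · rcases hb : PySem.Chars.isspace c with _|_
    · rfl
    · exfalso
      have hn := hb
      simp [PySem.Chars.isspace] at hn
      omega
  · intro he; subst he; revert e1 e2; decide
  · intro he; subst he; revert e1 e2; decide

-- scanning `part ++ ',' :: rest` = judging the part, then scanning the rest afresh
lemma scan_part {p : List Char} (hp : ',' ∉ p) (st lo hi : Int) (rest : List Char) :
    pvScan st lo hi (p ++ ',' :: rest) =
      if pvAccept st lo hi p then pvScan 0 0 0 rest else false := by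
  induction p generalizing st lo hi with
  | nil =>
    have hcd : PySem.Chars.isdigit ',' = false := by decide
    have hcs : PySem.Chars.isspace ',' = false := by decide
    simp only [List.nil_append, pvScan, pvAccept, pvClose]
    split_ifs <;> simp_all [pvOk1, pvOkR] <;> omega
  | cons c cs ih =>
    have hc : c ≠ ',' := fun h => hp (h ▸ List.mem_cons_self)
    have hcs : ',' ∉ cs := fun h => hp (List.mem_cons_of_mem _ h)
    simp only [List.cons_append, pvScan, pvAccept]
    split_ifs <;> simp_all [ih hcs]

-- digit runs accumulate the decimal value; trailing-space states; all-space closes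
lemma run1 {ds : List Char} (hd : ∀ x ∈ ds, PySem.Chars.isdigit x) :
    ∀ (lo hi : Int) (r : List Char),
      pvAccept 1 lo hi (ds ++ r) = pvAccept 1 (ds.foldl (fun a c => a * 10 + ((c.toNat : Int) - 48)) lo) hi r := by
  induction ds with
  | nil => intro lo hi r; simp
  | cons c cs ih =>
    intro lo hi r
    have hc : PySem.Chars.isdigit c := hd c List.mem_cons_self
    simp only [List.cons_append, pvAccept, List.foldl_cons, hc]
    simpa using ih (fun x hx => hd x (List.mem_cons_of_mem _ hx)) _ hi r

lemma run3 {ds : List Char} (hd : ∀ x ∈ ds, PySem.Chars.isdigit x) :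
    ∀ (lo hi : Int) (r : List Char),
      pvAccept 3 lo hi (ds ++ r) = pvAccept 3 lo (ds.foldl (fun a c => a * 10 + ((c.toNat : Int) - 48)) hi) r := by
  induction ds with
  | nil => intro lo hi r; simp
  | cons c cs ih =>
    intro lo hi r
    have hc : PySem.Chars.isdigit c := hd c List.mem_cons_self
    simp only [List.cons_append, pvAccept, List.foldl_cons, hc]
    norm_num
    simpa using ih (fun x hx => hd x (List.mem_cons_of_mem _ hx)) lo _ r

lemma run4 (w : List Char) (lo hi : Int) :
    pvAccept 4 lo hi w = (w.all PySem.Chars.isspace && pvOk1 lo) := by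
  induction w with
  | nil => simp [pvAccept, pvClose]
  | cons c cs ih =>
    simp only [pvAccept, List.all_cons]
    split_ifs with h <;> simp_all

lemma run5 (w : List Char) (lo hi : Int) :
    pvAccept 5 lo hi w = (w.all PySem.Chars.isspace && pvOkR lo hi) := by
  induction w with
  | nil => simp [pvAccept, pvClose]
  | cons c cs ih =>
    simp only [pvAccept, List.all_cons]
    split_ifs with h <;> simp_all

lemma ws1 {w : List Char} (hw : w.all PySem.Chars.isspace) (lo hi : Int) :
    pvAccept 1 lo hi w = pvOk1 lo := by
  cases w with
  | nil => simp [pvAccept, pvClose]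
  | cons c cs =>
    simp only [List.all_cons, Bool.and_eq_true] at hw
    obtain ⟨hcd, hcm, _⟩ := space_facts hw.1
    simp [pvAccept, hcd, hcm, hw.1, run4, hw.2]

lemma ws2 {w : List Char} (hw : w.all PySem.Chars.isspace) (lo hi : Int) :
    pvAccept 2 lo hi w = false := by
  cases w with
  | nil => simp [pvAccept, pvClose]
  | cons c cs =>
    simp only [List.all_cons, Bool.and_eq_true] at hw
    obtain ⟨hcd, _, _⟩ := space_facts hw.1
    simp [pvAccept, hcd]

lemma ws3 {w : List Char} (hw : w.all PySem.Chars.isspace) (lo hi : Int) :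
    pvAccept 3 lo hi w = pvOkR lo hi := by
  cases w with
  | nil => simp [pvAccept, pvClose]
  | cons c cs =>
    simp only [List.all_cons, Bool.and_eq_true] at hw
    obtain ⟨hcd, hcm, _⟩ := space_facts hw.1
    simp [pvAccept, hcd, hw.1, run5, hw.2]

lemma ws0 {w : List Char} (hw : w.all PySem.Chars.isspace) (lo hi : Int) (r : List Char) :
    pvAccept 0 lo hi (w ++ r) = pvAccept 0 lo hi r := by
  induction w with
  | nil => simp
  | cons c cs ih =>
    simp only [List.all_cons, Bool.and_eq_true] at hw
    simp [pvAccept, hw.1, ih hw.2]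

lemma dropWhile_head_false {p : Char → Bool} {l t : List Char} {x : Char}
    (h : l.dropWhile p = x :: t) : p x = false := by
  induction l with
  | nil => simp at h
  | cons a l' ih =>
    rw [List.dropWhile_cons] at h
    split_ifs at h with ha
    · exact ih h
    · rw [← (List.cons.injEq ..).mp h |>.1]; simpa using ha

lemma bool_ok1 (L : Int) : (if L < 1 || 65535 < L then false else true) = pvOk1 L := by
  simp [pvOk1]

lemma bool_okR (L H : Int) :
    (if L < 1 || H < 1 || 65535 < L || 65535 < H then false else if H < L then false else true) = pvOkR L H := by
  simp only [pvOkR]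
  split_ifs with h1 h2 <;> simp_all
  omega

lemma strIsdigit_iff (l : List Char) :
    PySem.Chars.strIsdigit l = true ↔ l ≠ [] ∧ ∀ x ∈ l, PySem.Chars.isdigit x := by
  simp [PySem.Chars.strIsdigit]

lemma tw_append {sep : Char} {u v : List Char} (hu : ∀ y ∈ u, y ≠ sep) :
    tw sep (u ++ sep :: v) = u ∧ rst sep (u ++ sep :: v) = v := by
  have h1 : tw sep (u ++ sep :: v) = u := by
    induction u with
    | nil => simp [tw]
    | cons a u' ih =>
      have ha : a ≠ sep := hu a List.mem_cons_self
      have hih := ih (fun y hy => hu y (List.mem_cons_of_mem _ hy))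
      simp only [List.cons_append, tw, List.takeWhile_cons, ha, decide_false, Bool.not_false, if_true]
      simpa [tw] using hih
  refine ⟨h1, ?_⟩
  simp [rst, h1]

lemma mem_tw {sep x : Char} {u v : List Char} (hu : ∀ y ∈ u, y ≠ sep) (hx : x ≠ sep) :
    x ∈ tw sep (u ++ x :: v) := by
  induction u with
  | nil => simp [tw, hx]
  | cons a u' ih =>
    have ha : a ≠ sep := hu a List.mem_cons_self
    have hih := ih (fun y hy => hu y (List.mem_cons_of_mem _ hy))
    simp only [List.cons_append, tw, List.takeWhile_cons, ha, decide_false, Bool.not_false, if_true, List.mem_cons]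
    right
    simpa [tw] using hih

lemma last_not_space {s u r4 : List Char} {x : Char}
    (hs : s = u ++ x :: r4)
    (hlast : ∀ c, s.getLast? = some c → PySem.Chars.isspace c = false)
    (hx : PySem.Chars.isspace x = true) (hr : r4.all PySem.Chars.isspace = true) : False := by
  have hne : (x :: r4) ≠ ([] : List Char) := by simp
  have hl : s.getLast? = (x :: r4).getLast? := by
    rw [hs]; exact List.getLast?_append_of_ne_nil _ hne
  have hmem : (x :: r4).getLast hne ∈ x :: r4 := List.getLast_mem hne
  have hlv : (x :: r4).getLast? = some ((x :: r4).getLast hne) := List.getLast?_eq_some_getLast hne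
  have := hlast _ (hl.trans hlv)
  rcases List.mem_cons.mp hmem with h1 | h1
  · rw [← h1] at hx; simp [this] at hx
  · have := List.all_eq_true.mp hr _ h1
    simp_all

-- A's per-part check rejects parts whose relevant piece has a non-digit
lemma acheck_nondigit_head {c : Char} {cs : List Char} (hcd : PySem.Chars.isdigit c = false) :
    pvACheck (c :: cs) = false := by
  by_cases hdm : '-' ∈ (c :: cs)
  · have hin : PySem.Chars.isIn ['-'] (c :: cs) = true := (isIn_single _ _).mpr hdm
    unfold pvACheck
    rw [splitOnMax_one '-' hdm]
    by_cases hc : c = '-'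
    · subst hc
      have : tw '-' ('-' :: cs) = [] := by simp [tw]
      simp [this, hin, PySem.Chars.strIsdigit]
    · have htw : tw '-' (c :: cs) = c :: tw '-' cs := by simp [tw, hc]
      have : PySem.Chars.strIsdigit (tw '-' (c :: cs)) = false := by
        rw [htw]
        rcases hb : PySem.Chars.strIsdigit (c :: tw '-' cs) with _|_
        · rfl
        · exact absurd (((strIsdigit_iff _).mp hb).2 c List.mem_cons_self) (by simp [hcd])
      simp [hin, this]
  · have hin : PySem.Chars.isIn ['-'] (c :: cs) = false := by
      rcases hb : PySem.Chars.isIn ['-'] (c :: cs) with _|_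
      · rfl
      · exact absurd ((isIn_single _ _).mp hb) hdm
    have : PySem.Chars.strIsdigit (c :: cs) = false := by
      rcases hb : PySem.Chars.strIsdigit (c :: cs) with _|_
      · rfl
      · exact absurd (((strIsdigit_iff _).mp hb).2 c List.mem_cons_self) (by simp [hcd])
    simp [pvACheck, hin, this]

lemma acheck_nondigit_mem {s : List Char} {x : Char} {u v : List Char}
    (hs : s = u ++ x :: v) (hu : ∀ y ∈ u, PySem.Chars.isdigit y)
    (hxd : PySem.Chars.isdigit x = false) (hx : x ≠ '-') :
    pvACheck s = false := by
  have hne : s ≠ [] := by rw [hs]; simp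
  by_cases hdm : '-' ∈ s
  · have hin : PySem.Chars.isIn ['-'] s = true := (isIn_single _ _).mpr hdm
    have hmem : x ∈ tw '-' s := by
      rw [hs]
      exact mem_tw (fun y hy => (digit_facts (hu y hy)).2.1) hx
    have hsd : PySem.Chars.strIsdigit (tw '-' s) = false := by
      rcases hb : PySem.Chars.strIsdigit (tw '-' s) with _|_
      · rfl
      · exact absurd (((strIsdigit_iff _).mp hb).2 x hmem) (by simp [hxd])
    unfold pvACheck
    rw [splitOnMax_one '-' hdm]
    simp [hin, hsd, List.isEmpty_iff, hne]
  · have hin : PySem.Chars.isIn ['-'] s = false := by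
      rcases hb : PySem.Chars.isIn ['-'] s with _|_
      · rfl
      · exact absurd ((isIn_single _ _).mp hb) hdm
    have hsd : PySem.Chars.strIsdigit s = false := by
      rcases hb : PySem.Chars.strIsdigit s with _|_
      · rfl
      · refine absurd (((strIsdigit_iff _).mp hb).2 x ?_) (by simp [hxd])
        rw [hs]; simp
    simp [pvACheck, hin, hsd, List.isEmpty_iff, hne]

-- the core: on a part with no commas, no leading and no trailing space, followed by
-- an all-space tail, the automaton's verdict is A's per-part check
lemma accept_part {s w : List Char} (hc : ',' ∉ s) (hw : w.all PySem.Chars.isspace)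
    (hhead : ∀ c, s.head? = some c → PySem.Chars.isspace c = false)
    (hlast : ∀ c, s.getLast? = some c → PySem.Chars.isspace c = false) :
    pvAccept 0 0 0 (s ++ w) = pvACheck s := by
  cases hs : s with
  | nil =>
    rw [List.nil_append, show w = w ++ [] by simp, ws0 hw]
    simp [pvAccept, pvClose, pvACheck]
  | cons c cs =>
    subst hs
    have hheadc : PySem.Chars.isspace c = false := hhead c rfl
    by_cases hcd : PySem.Chars.isdigit c
    case neg =>
      rw [acheck_nondigit_head (by simp [hcd])]
      simp [pvAccept, hheadc, hcd]
    case pos =>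
      -- s = ds ++ r with ds the maximal digit prefix (nonempty)
      have hsplit := List.takeWhile_append_dropWhile (p := PySem.Chars.isdigit) (l := c :: cs)
      set ds := (c :: cs).takeWhile PySem.Chars.isdigit with hds
      set r := (c :: cs).dropWhile PySem.Chars.isdigit with hr
      have hdall : ∀ x ∈ ds, PySem.Chars.isdigit x := fun x hx => List.mem_takeWhile_imp hx
      have hdshape : ds = c :: cs.takeWhile PySem.Chars.isdigit := by
        rw [hds, List.takeWhile_cons, if_pos hcd]
      -- B runs the first number
      have hB : pvAccept 0 0 0 ((c :: cs) ++ w) = pvAccept 1 (pvIntOf ds) 0 (r ++ w) := by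
        have h0 : pvAccept 0 0 0 ((c :: cs) ++ w) = pvAccept 1 ((c.toNat : Int) - 48) 0 (cs ++ w) := by
          simp [pvAccept, hheadc, hcd]
        have hcs0 : cs = cs.takeWhile PySem.Chars.isdigit ++ r := by
          have h2 := hsplit
          rw [hdshape] at h2
          simpa using h2.symm
        have hcs : cs ++ w = cs.takeWhile PySem.Chars.isdigit ++ (r ++ w) := by
          conv_lhs => rw [hcs0]
          simp
        rw [h0, hcs, run1 (fun x hx => List.mem_takeWhile_imp hx)]
        congr 1
        rw [pvIntOf, hdshape, List.foldl_cons]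
        norm_num
      rw [hB]
      -- case split on what follows the first number
      cases hrc : r with
      | nil =>
        -- the part is all digits
        have hsds : c :: cs = ds := by rw [← hsplit, hrc]; simp
        rw [List.nil_append, ws1 hw]
        have hnm : '-' ∉ (c :: cs) := by
          rw [hsds]; intro hm; exact absurd (digit_facts (hdall _ hm)).2.1 (by simp)
        have hin : PySem.Chars.isIn ['-'] (c :: cs) = false := by
          rcases hb : PySem.Chars.isIn ['-'] (c :: cs) with _|_
          · rfl
          · exact absurd ((isIn_single _ _).mp hb) hnm
        have hsd : PySem.Chars.strIsdigit (c :: cs) = true := by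
          rw [strIsdigit_iff]
          exact ⟨by simp, by rw [hsds]; exact hdall⟩
        rw [show pvIntOf ds = pvIntOf (c :: cs) by rw [hsds]]
        simp only [pvACheck, List.isEmpty_cons, hin, hsd, Bool.not_true, Bool.if_false_left]
        rw [← bool_ok1 (pvIntOf (c :: cs))]
        simp
      | cons x r2 =>
        have hxd : PySem.Chars.isdigit x = false := dropWhile_head_false (hr ▸ hrc)
        have hsx : c :: cs = ds ++ x :: r2 := by rw [← hsplit, hrc]
        have hxmem : x ∈ c :: cs := by rw [hsx]; simp
        have hxc : x ≠ ',' := fun h => hc (h ▸ hxmem)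
        by_cases hx : x = '-'
        · subst hx
          -- range part: ds "-" r2
          have hdm : '-' ∈ (c :: cs) := by rw [hsx]; simp
          have hin : PySem.Chars.isIn ['-'] (c :: cs) = true := (isIn_single _ _).mpr hdm
          have htwr := tw_append (v := r2) (fun y hy => (digit_facts (hdall y hy)).2.1)
          have hsd : PySem.Chars.strIsdigit ds = true := by
            rw [strIsdigit_iff]
            refine ⟨by rw [hdshape]; simp, hdall⟩
          have hA : pvACheck (c :: cs) =
              (if !(PySem.Chars.strIsdigit r2) then false
               else if pvIntOf ds < 1 || pvIntOf r2 < 1 || 65535 < pvIntOf ds || 65535 < pvIntOf r2 then false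
               else if pvIntOf r2 < pvIntOf ds then false else true) := by
            rw [hsx]
            have hdm2 : '-' ∈ ds ++ '-' :: r2 := by simp
            have hin2 : PySem.Chars.isIn ['-'] (ds ++ '-' :: r2) = true := (isIn_single _ _).mpr hdm2
            have hne2 : (ds ++ '-' :: r2).isEmpty = false := by simp
            unfold pvACheck
            rw [splitOnMax_one '-' hdm2, htwr.1, htwr.2]
            simp only [hne2, hin2, hsd]
            simp
          have hB2 : pvAccept 1 (pvIntOf ds) 0 (('-' :: r2) ++ w) = pvAccept 2 (pvIntOf ds) 0 (r2 ++ w) := by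
            simp [pvAccept, hxd]
          rw [hB2, hA]
          -- now analyse r2
          cases hr2 : r2 with
          | nil =>
            rw [List.nil_append, ws2 hw]
            simp [PySem.Chars.strIsdigit]
          | cons e es' =>
            by_cases hed : PySem.Chars.isdigit e
            · -- second number begins
              have hsplit2 := List.takeWhile_append_dropWhile (p := PySem.Chars.isdigit) (l := e :: es')
              set es := (e :: es').takeWhile PySem.Chars.isdigit with hes
              set r3 := (e :: es').dropWhile PySem.Chars.isdigit with hr3
              have heall : ∀ y ∈ es, PySem.Chars.isdigit y := fun y hy => List.mem_takeWhile_imp hy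
              have heshape : es = e :: es'.takeWhile PySem.Chars.isdigit := by
                rw [hes, List.takeWhile_cons, if_pos hed]
              have hB3 : pvAccept 2 (pvIntOf ds) 0 ((e :: es') ++ w) = pvAccept 3 (pvIntOf ds) (pvIntOf es) (r3 ++ w) := by
                have h0 : pvAccept 2 (pvIntOf ds) 0 ((e :: es') ++ w) = pvAccept 3 (pvIntOf ds) ((e.toNat : Int) - 48) (es' ++ w) := by
                  simp [pvAccept, hed]
                have hcs0 : es' = es'.takeWhile PySem.Chars.isdigit ++ r3 := by
                  have h2 := hsplit2
                  rw [heshape] at h2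
                  simpa using h2.symm
                have hcs2 : es' ++ w = es'.takeWhile PySem.Chars.isdigit ++ (r3 ++ w) := by
                  conv_lhs => rw [hcs0]
                  simp
                rw [h0, hcs2, run3 (fun y hy => List.mem_takeWhile_imp hy)]
                congr 1
                rw [pvIntOf, heshape, List.foldl_cons]
                norm_num
              rw [hB3]
              cases hr3c : r3 with
              | nil =>
                have hses : e :: es' = es := by rw [← hsplit2, hr3c]; simp
                rw [List.nil_append, ws3 hw]
                have hsd2 : PySem.Chars.strIsdigit (e :: es') = true := by
                  rw [strIsdigit_iff]
                  exact ⟨by simp, by rw [hses]; exact heall⟩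
                rw [hsd2, show pvIntOf es = pvIntOf (e :: es') by rw [hses]]
                rw [← bool_okR (pvIntOf ds) (pvIntOf (e :: es'))]
                simp
              | cons x3 r4 =>
                have hx3d : PySem.Chars.isdigit x3 = false := dropWhile_head_false (hr3 ▸ hr3c)
                have hsx3 : e :: es' = es ++ x3 :: r4 := by rw [← hsplit2, hr3c]
                have hx3mem : x3 ∈ c :: cs := by rw [hsx, hr2, hsx3]; simp
                have hx3c : x3 ≠ ',' := fun h => hc (h ▸ hx3mem)
                have hsd2 : PySem.Chars.strIsdigit (e :: es') = false := by
                  rcases hb : PySem.Chars.strIsdigit (e :: es') with _|_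
                  · rfl
                  · refine absurd (((strIsdigit_iff _).mp hb).2 x3 ?_) (by simp [hx3d])
                    rw [hsx3]; simp
                rw [hsd2]
                have hBfin : pvAccept 3 (pvIntOf ds) (pvIntOf es) ((x3 :: r4) ++ w) = false := by
                  by_cases hx3s : PySem.Chars.isspace x3
                  · have hr4 : r4.all PySem.Chars.isspace = false := by
                      rcases hb : r4.all PySem.Chars.isspace with _|_
                      · rfl
                      · exact absurd (last_not_space (u := ds ++ '-' :: es)
                          (by rw [hsx, hr2, hsx3]; simp) hlast hx3s hb) (fun h => h)
                    simp only [List.cons_append, pvAccept, hx3d, hx3s]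
                    norm_num
                    rw [run5]
                    simp [hr4]
                  · simp [pvAccept, hx3d, hx3s]
                rw [hBfin]
                simp
            · -- second piece does not start with a digit
              have hsd2 : PySem.Chars.strIsdigit (e :: es') = false := by
                rcases hb : PySem.Chars.strIsdigit (e :: es') with _|_
                · rfl
                · exact absurd (((strIsdigit_iff _).mp hb).2 e List.mem_cons_self) (by simp [hed])
              rw [hsd2]
              simp [pvAccept, hed]
        · -- first number followed by junk (not '-' and not a digit)
          rw [acheck_nondigit_mem hsx hdall hxd hx]
          by_cases hxs : PySem.Chars.isspace x
          · have hr2w : r2.all PySem.Chars.isspace = false := by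
              rcases hb : r2.all PySem.Chars.isspace with _|_
              · rfl
              · exact absurd (last_not_space (u := ds) hsx hlast hxs hb) (fun h => h)
            simp only [List.cons_append, pvAccept, hxd, hxs, hx]
            norm_num
            rw [run4]
            simp [hr2w]
          · simp [pvAccept, hxd, hxs, hx]

-- lift to arbitrary comma-free parts via strip
lemma accept_strip {q : List Char} (hq : ',' ∉ q) :
    pvAccept 0 0 0 q = pvACheck (PySem.Chars.strip q) := by
  have hqsplit : q = q.takeWhile PySem.Chars.isspace ++ q.dropWhile PySem.Chars.isspace :=
    (List.takeWhile_append_dropWhile ..).symm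
  set t := q.dropWhile PySem.Chars.isspace with ht
  have hlw : (q.takeWhile PySem.Chars.isspace).all PySem.Chars.isspace :=
    List.all_eq_true.mpr (fun x hx => List.mem_takeWhile_imp hx)
  have h1 : pvAccept 0 0 0 q = pvAccept 0 0 0 t := by
    conv_lhs => rw [hqsplit]
    exact ws0 hlw 0 0 t
  set s := (t.reverse.dropWhile PySem.Chars.isspace).reverse with hsdef
  set wt := (t.reverse.takeWhile PySem.Chars.isspace).reverse with hwt
  have htrev : t.reverse = t.reverse.takeWhile PySem.Chars.isspace ++ t.reverse.dropWhile PySem.Chars.isspace :=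
    (List.takeWhile_append_dropWhile ..).symm
  have hts : t = s ++ wt := by
    conv_lhs => rw [← List.reverse_reverse t, htrev]
    rw [List.reverse_append]
  have hstrip : PySem.Chars.strip q = s := by
    simp [PySem.Chars.strip, PySem.Chars.lstrip, PySem.Chars.rstrip, ← ht, hsdef]
  have hmemt : ∀ x ∈ t, x ∈ q := fun x hx => (List.dropWhile_sublist _).subset hx
  have hmems : ∀ x ∈ s, x ∈ t := by
    intro x hx
    rw [hsdef, List.mem_reverse] at hx
    have := (List.dropWhile_sublist (l := t.reverse) PySem.Chars.isspace).subset hx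
    simpa using this
  have hcfree : ',' ∉ s := fun h => hq (hmemt _ (hmems _ h))
  have hwall : wt.all PySem.Chars.isspace := by
    rw [hwt]
    refine List.all_eq_true.mpr (fun x hx => ?_)
    rw [List.mem_reverse] at hx
    exact List.mem_takeWhile_imp hx
  have hhead : ∀ c, s.head? = some c → PySem.Chars.isspace c = false := by
    intro c hch
    cases hsc : s with
    | nil => rw [hsc] at hch; simp at hch
    | cons a s' =>
      have hac : a = c := by rw [hsc] at hch; simpa using hch
      have hdw : q.dropWhile PySem.Chars.isspace = a :: (s' ++ wt) := by
        rw [← ht, hts, hsc]; simp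
      rw [← hac]
      exact dropWhile_head_false hdw
  have hlast : ∀ c, s.getLast? = some c → PySem.Chars.isspace c = false := by
    intro c hcl
    have hrev : s.reverse.head? = some c := by
      rw [List.head?_reverse]; exact hcl
    cases hsc : s.reverse with
    | nil => rw [hsc] at hrev; simp at hrev
    | cons a s' =>
      have hac : a = c := by rw [hsc] at hrev; simpa using hrev
      have hrd : s.reverse = (List.dropWhile PySem.Chars.isspace t.reverse) := by
        rw [hsdef]; simp
      have hdw : t.reverse.dropWhile PySem.Chars.isspace = a :: s' := by
        rw [← hrd, hsc]
      rw [← hac]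
      exact dropWhile_head_false hdw
  rw [h1, hstrip, hts]
  exact accept_part hcfree hwall hhead hlast

-- the outer loop
lemma main_loop (p : List Char) :
    pvALoop (PySem.Chars.splitOn p [',']) = pvScan 0 0 0 (p ++ [',']) := by
  induction hn : p.length using Nat.strong_induction_on generalizing p with
  | _ n ih =>
    subst hn
    by_cases hm : ',' ∈ p
    · have hfree : ',' ∉ tw ',' p := not_mem_tw ',' p
      rw [splitOn_char, if_pos hm]
      have hshape : p ++ [','] = tw ',' p ++ ',' :: (rst ',' p ++ [',']) := by
        conv_lhs => rw [decomp ',' hm]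
        simp
      rw [hshape, scan_part hfree, ← ih _ (length_rst ',' hm) _ rfl]
      have hacc : pvAccept 0 0 0 (tw ',' p) = pvACheck (PySem.Chars.strip (tw ',' p)) :=
        accept_strip hfree
      simp only [pvALoop, hacc]
    · rw [splitOn_char, if_neg hm]
      have : p ++ [','] = p ++ ',' :: [] := by simp
      rw [this, scan_part hm, accept_strip hm]
      simp only [pvALoop, pvScan]

-- ===== VERDICT (by name: the statement is the Claim_ definition above) =====
theorem is_valid_ports_spec_py_spec : Claim_equal_is_valid_ports_spec_py := by
  intro value _
  unfold Spec_is_valid_ports_spec_py is_valid_ports_spec_py is_valid_ports_spec_py_alt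
  simp only [main_loop]
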